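-- pv_equiv track=rewrite | github.com/darshangowda777/HushHushRecruiter | Data_Collection/fetchingcode.py | infer_pr_category
-- ===== SOURCE A (Python) =====
-- def infer_pr_category(title, labels):
--     title_lower = title.lower()
--     label_names = {label.lower() for label in labels}
--     if any(kw in title_lower or f"bug" in label_names for kw in ['fix', 'bug', 'patch']):
--         return "Bugfix"
--     if any(kw in title_lower or f"feature" in label_names for kw in ['feat', 'feature', 'add']):
--         return "Feature"
--     if any(kw in title_lower or f"refactor" in label_names for kw in ['refactor', 'perf', 'performance']):
--         return "Refactor"
--     if any(kw in title_lower or f"docs" in label_names for kw in ['doc', 'docs', 'documentation']):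
--         return "Documentation"
--     return "Enhancement"
-- ===== SOURCE B (Python) =====
-- LABEL_PRIORITY = {"bug": 0, "feature": 1, "refactor": 2, "docs": 3}
-- KEYWORD_PRIORITY = [
--     ("fix", 0), ("bug", 0), ("patch", 0),
--     ("feat", 1), ("feature", 1), ("add", 1),
--     ("refactor", 2), ("perf", 2), ("performance", 2),
--     ("doc", 3), ("docs", 3), ("documentation", 3),
-- ]
-- CATEGORIES = ["Bugfix", "Feature", "Refactor", "Documentation", "Enhancement"]
--
-- def infer_pr_category(title, labels):
--     tl = title.lower()
--     best = 4
--     for lab in labels: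
--         best = min(best, LABEL_PRIORITY.get(lab.lower(), 4))
--     for kw, p in KEYWORD_PRIORITY:
--         if kw in tl:
--             best = min(best, p)
--     return CATEGORIES[best]
-- ===== Notes on version B (the rewrite author's own statement) =====
-- stated objective: alternative
-- what changed: Replaces A's ordered early-return if/any cascade by a priority-minimisation pass: every label and matching keyword contributes a numeric priority, a single min accumulator is folded over both, and the answer is an index into a category table (no set is built, no early return).
import Mathlib
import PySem

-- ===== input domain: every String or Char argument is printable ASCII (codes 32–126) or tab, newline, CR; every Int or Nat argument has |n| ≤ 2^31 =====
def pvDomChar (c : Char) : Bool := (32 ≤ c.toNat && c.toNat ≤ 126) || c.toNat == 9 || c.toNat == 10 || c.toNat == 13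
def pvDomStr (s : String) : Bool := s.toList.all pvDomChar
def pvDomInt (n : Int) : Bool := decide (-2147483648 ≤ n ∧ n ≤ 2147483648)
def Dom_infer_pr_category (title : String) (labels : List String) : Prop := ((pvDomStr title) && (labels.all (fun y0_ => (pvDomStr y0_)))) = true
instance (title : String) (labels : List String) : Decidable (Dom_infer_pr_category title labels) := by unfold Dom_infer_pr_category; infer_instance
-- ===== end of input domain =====

-- B replaces A's ordered early-return cascade by priority minimisation over a keyword/label
-- priority table, indexing into a category list (objective: alternative).

-- ===== PORT A =====
def infer_pr_category (title : String) (labels : List String) : String :=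
  let title_lower := PySem.Str.lower title
  let label_names : PySem.Set String := PySem.Set.ofList (labels.map PySem.Str.lower)
  if (["fix", "bug", "patch"].any fun kw =>
      PySem.Str.isIn kw title_lower || label_names.contains "bug") then "Bugfix"
  else if (["feat", "feature", "add"].any fun kw =>
      PySem.Str.isIn kw title_lower || label_names.contains "feature") then "Feature"
  else if (["refactor", "perf", "performance"].any fun kw =>
      PySem.Str.isIn kw title_lower || label_names.contains "refactor") then "Refactor"
  else if (["doc", "docs", "documentation"].any fun kw =>
      PySem.Str.isIn kw title_lower || label_names.contains "docs") then "Documentation"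
  else "Enhancement"

-- ===== PORT B =====
def pvLabelPriority : PySem.Dict String Int :=
  PySem.Dict.ofList [("bug", 0), ("feature", 1), ("refactor", 2), ("docs", 3)]

def pvKeywordPriority : List (String × Int) :=
  [("fix", 0), ("bug", 0), ("patch", 0),
   ("feat", 1), ("feature", 1), ("add", 1),
   ("refactor", 2), ("perf", 2), ("performance", 2),
   ("doc", 3), ("docs", 3), ("documentation", 3)]

def pvCategories : List String :=
  ["Bugfix", "Feature", "Refactor", "Documentation", "Enhancement"]

def infer_pr_category_alt (title : String) (labels : List String) : String :=
  let tl := PySem.Str.lower title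
  let best1 : Int := labels.foldl
    (fun b lab => min b (PySem.Dict.getD pvLabelPriority (PySem.Str.lower lab) 4)) 4
  let best2 : Int := pvKeywordPriority.foldl
    (fun b kp => if PySem.Str.isIn kp.1 tl then min b kp.2 else b) best1
  -- CATEGORIES[best]: 0 ≤ best ≤ 4 always, so the index is in range and the default is dead
  (PySem.List.pyGet? pvCategories best2).getD ""

-- ===== PRECONDITION & SPEC =====
def Spec_infer_pr_category (title : String) (labels : List String) (out : String) : Prop := out = infer_pr_category_alt title labels
instance (title : String) (labels : List String) (out : String) : Decidable (Spec_infer_pr_category title labels out) := by unfold Spec_infer_pr_category; infer_instance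

-- ===== CLAIM (what is proved, stated in full; the proofs are below) =====
def Claim_equal_infer_pr_category : Prop := ∀ (title : String) (labels : List String), Dom_infer_pr_category title labels → Spec_infer_pr_category title labels (infer_pr_category title labels)

-- ===== LEMMAS AND PROOFS =====

-- the label dict lookup, as an if-chain on the key
theorem pv_getD_label (k : String) :
    PySem.Dict.getD pvLabelPriority k 4 =
      if k == "bug" then 0 else if k == "feature" then 1
      else if k == "refactor" then 2 else if k == "docs" then 3 else 4 := by
  have hd : pvLabelPriority =
      { items := [("bug", 0), ("feature", 1), ("refactor", 2), ("docs", 3)] } := by decide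
  rw [hd]
  simp only [PySem.Dict.getD, PySem.Dict.get?, List.find?]
  cases h1 : ("bug" == k) <;> cases h2 : ("feature" == k) <;>
    cases h3 : ("refactor" == k) <;> cases h4 : ("docs" == k) <;>
    simp [BEq.comm] at h1 h2 h3 h4 ⊢ <;> simp [h1, h2, h3, h4]

-- the first-matching-rule value of the four label flags
def pvL (a1 a2 a3 a4 : Bool) : Int :=
  if a1 then 0 else if a2 then 1 else if a3 then 2 else if a4 then 3 else 4

-- B's label loop computes the minimum label priority
set_option maxHeartbeats 1600000 in
theorem pv_label_fold (labels : List String) (b : Int) (hb : b ≤ 4) :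
    labels.foldl
      (fun b lab => min b (PySem.Dict.getD pvLabelPriority (PySem.Str.lower lab) 4)) b
    = min b (pvL (labels.any (fun l => PySem.Str.lower l == "bug"))
                 (labels.any (fun l => PySem.Str.lower l == "feature"))
                 (labels.any (fun l => PySem.Str.lower l == "refactor"))
                 (labels.any (fun l => PySem.Str.lower l == "docs"))) := by
  induction labels generalizing b with
  | nil => simp [pvL]; omega
  | cons l rest ih =>
      simp only [List.foldl_cons, List.any_cons]
      rw [ih _ (by
        have := min_le_left b (PySem.Dict.getD pvLabelPriority (PySem.Str.lower l) 4)
        omega)]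
      rw [pv_getD_label]
      generalize (PySem.Str.lower l == "bug") = e1
      generalize (PySem.Str.lower l == "feature") = e2
      generalize (PySem.Str.lower l == "refactor") = e3
      generalize (PySem.Str.lower l == "docs") = e4
      generalize (rest.any (fun l => PySem.Str.lower l == "bug")) = a1
      generalize (rest.any (fun l => PySem.Str.lower l == "feature")) = a2
      generalize (rest.any (fun l => PySem.Str.lower l == "refactor")) = a3
      generalize (rest.any (fun l => PySem.Str.lower l == "docs")) = a4
      cases e1 <;> cases e2 <;> cases e3 <;> cases e4 <;>
        cases a1 <;> cases a2 <;> cases a3 <;> cases a4 <;>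
        simp [pvL]

-- A's set membership is an `any` over the raw label list
theorem pv_contains_ofList_map (labels : List String) (y : String) :
    (PySem.Set.ofList (labels.map PySem.Str.lower)).contains y
      = labels.any (fun l => PySem.Str.lower l == y) := by
  rw [Bool.eq_iff_iff]
  simp only [PySem.Set.contains_eq_listContains, List.contains_eq_mem,
    PySem.Set.mem_ofList, List.mem_map, decide_eq_true_eq, List.any_eq_true, beq_iff_eq]

-- collapses A's `any` over one three-keyword rule (the label test repeats per keyword)
theorem pv_or3 (x y z d : Bool) :
    ((x || d) || ((y || d) || (z || d))) = ((x || y || z) || d) := by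
  cases x <;> cases y <;> cases z <;> cases d <;> rfl

-- collapses three consecutive same-priority steps of B's keyword loop
theorem pv_min3 (x y z : Bool) (b p : Int) :
    (if z = true then
       min (if y = true then min (if x = true then min b p else b) p
            else if x = true then min b p else b) p
     else if y = true then min (if x = true then min b p else b) p
          else if x = true then min b p else b)
    = if (x || y || z) = true then min b p else b := by
  cases x <;> cases y <;> cases z <;> simp

-- ===== VERDICT (by name: the statement is the Claim_ definition above) =====
theorem infer_pr_category_spec : Claim_equal_infer_pr_category := by
  intro title labels _
  unfold Spec_infer_pr_category infer_pr_category infer_pr_category_alt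
  rw [pv_label_fold _ _ (by omega)]
  simp only [pvKeywordPriority, pvCategories, List.foldl_cons, List.foldl_nil,
    List.any_cons, List.any_nil, Bool.or_false, pv_contains_ofList_map, pvL, pv_or3]
  rw [pv_min3, pv_min3, pv_min3, pv_min3]
  generalize (PySem.Str.isIn "fix" (PySem.Str.lower title) ||
      PySem.Str.isIn "bug" (PySem.Str.lower title) ||
      PySem.Str.isIn "patch" (PySem.Str.lower title)) = g1
  generalize (PySem.Str.isIn "feat" (PySem.Str.lower title) ||
      PySem.Str.isIn "feature" (PySem.Str.lower title) ||
      PySem.Str.isIn "add" (PySem.Str.lower title)) = g2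
  generalize (PySem.Str.isIn "refactor" (PySem.Str.lower title) ||
      PySem.Str.isIn "perf" (PySem.Str.lower title) ||
      PySem.Str.isIn "performance" (PySem.Str.lower title)) = g3
  generalize (PySem.Str.isIn "doc" (PySem.Str.lower title) ||
      PySem.Str.isIn "docs" (PySem.Str.lower title) ||
      PySem.Str.isIn "documentation" (PySem.Str.lower title)) = g4
  generalize (labels.any (fun l => PySem.Str.lower l == "bug")) = a1
  generalize (labels.any (fun l => PySem.Str.lower l == "feature")) = a2
  generalize (labels.any (fun l => PySem.Str.lower l == "refactor")) = a3
  generalize (labels.any (fun l => PySem.Str.lower l == "docs")) = a4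
  revert g1 g2 g3 g4 a1 a2 a3 a4
  decide
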